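-- pv_equiv track=rewrite | github.com/ritesh-deshmukh/Algorithms-and-Data-Structures | InterviewQuestions/go_inc_questionnairesum.py | f
-- ===== SOURCE A (Python) =====
-- def f(s):
--     if s == "":
--         return [""]
--     result = []
--     for p in f(s[1:]):
--         for i in range(len(p) + 1):
--             # p_i = s[0] + p[i:]
--             # p_i = p[:i-1] + s[i] + p[i+1:]
--             # p_i = p[:i] + s[0] + p[i:]
--             p_i = p[:i] + s[0]
--             result.append(p_i)
--
--     return result
-- ===== SOURCE B (Python) =====
-- def f(s):
--     cur = [""]
--     for c in reversed(s):
--         cur = [p[:i] + c for p in cur for i in range(len(p) + 1)]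
--     return cur
-- ===== Notes on version B (the rewrite author's own statement) =====
-- stated objective: simpler
-- what changed: Replaces the recursion on the string tail with an iterative left fold over reversed(s), rebuilding the list with a flat comprehension instead of nested append loops.
import Mathlib
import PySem

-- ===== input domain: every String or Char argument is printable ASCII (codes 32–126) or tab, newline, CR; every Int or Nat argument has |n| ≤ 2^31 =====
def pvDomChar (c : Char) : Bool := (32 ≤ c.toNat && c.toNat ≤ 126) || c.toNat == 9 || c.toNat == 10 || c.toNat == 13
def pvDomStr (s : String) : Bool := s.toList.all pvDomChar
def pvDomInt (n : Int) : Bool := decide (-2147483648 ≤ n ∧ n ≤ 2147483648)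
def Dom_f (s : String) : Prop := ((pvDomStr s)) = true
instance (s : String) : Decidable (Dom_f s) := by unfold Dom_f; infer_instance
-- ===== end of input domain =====

-- B replaces A's recursion on the string tail with an iterative fold over the
-- reversed string using a flat comprehension: simpler, same values and order.


-- ===== PORT A =====
-- recursion on the character list; p[:i] with 0 ≤ i ≤ len p is List.take i (exact),
-- s[0] is the head, s[1:] the tail, range(len(p)+1) is List.range (p.length+1)
def fAChars : List Char → List (List Char)
  | [] => [[]]
  | c :: rest =>
      (fAChars rest).foldl
        (fun result p =>
          (List.range (p.length + 1)).foldl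
            (fun result i => result ++ [p.take i ++ [c]]) result)
        []

def f (s : String) : List String :=
  (fAChars s.toList).map (fun p => String.ofList p)

-- ===== PORT B =====
-- one comprehension step: cur = [p[:i] + c for p in cur for i in range(len(p)+1)]
def fBStep (cur : List (List Char)) (c : Char) : List (List Char) :=
  cur.flatMap (fun p => (List.range (p.length + 1)).map (fun i => p.take i ++ [c]))

def f_alt (s : String) : List String :=
  ((s.toList.reverse).foldl fBStep [[]]).map (fun p => String.ofList p)

-- ===== PRECONDITION & SPEC =====
def Spec_f (s : String) (out : List String) : Prop := out = f_alt s
instance (s : String) (out : List String) : Decidable (Spec_f s out) := by unfold Spec_f; infer_instance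

-- ===== CLAIM (what is proved, stated in full; the proofs are below) =====
def Claim_equal_f : Prop := ∀ (s : String), Dom_f s → Spec_f s (f s)

-- ===== LEMMAS AND PROOFS =====

-- A's one recursion step is exactly B's comprehension step
theorem fAChars_cons (c : Char) (rest : List Char) :
    fAChars (c :: rest) = fBStep (fAChars rest) c := by
  show (fAChars rest).foldl
        (fun result p =>
          (List.range (p.length + 1)).foldl
            (fun result i => result ++ [p.take i ++ [c]]) result)
        [] = _
  have h : ∀ (acc : List (List Char)) (p : List Char),
      (List.range (p.length + 1)).foldl
        (fun result i => result ++ [p.take i ++ [c]]) acc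
      = acc ++ (List.range (p.length + 1)).map (fun i => p.take i ++ [c]) := by
    intro acc p
    exact PySem.List.foldl_append_singleton_eq_map _ _ _
  refine (PySem.List.foldl_congr_mem (fAChars rest) _
      (fun result p =>
        result ++ (List.range (p.length + 1)).map (fun i => p.take i ++ [c]))
      [] (fun acc p _ => h acc p)).trans ?_
  rw [PySem.List.foldl_append_eq_flatMap]
  rfl

theorem fAChars_eq_foldr (l : List Char) :
    fAChars l = l.foldr (fun c cur => fBStep cur c) [[]] := by
  induction l with
  | nil => rfl
  | cons c rest ih => rw [fAChars_cons, ih]; rfl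

-- ===== VERDICT (by name: the statement is the Claim_ definition above) =====
theorem f_spec : Claim_equal_f := by
  intro s _
  unfold Spec_f f f_alt
  rw [List.foldl_reverse, fAChars_eq_foldr]
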